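-- pv_equiv track=rewrite | github.com/bmesuere/vlinder | api/database.py | fix_cumulative_rain
-- ===== SOURCE A (Python) =====
-- def fix_cumulative_rain(d_list):
--     prev = d_list[0]['rainVolume']
--     delta = -prev
--     for d in d_list:
--         if d['rainVolume'] < prev:
--             delta += prev - d['rainVolume']
--         prev = d['rainVolume']
--         d['rainVolume'] += delta
--     return d_list
-- ===== SOURCE B (Python) =====
-- def fix_cumulative_rain(d_list):
--     # Multi-pass: extract volumes, clamp consecutive diffs, prefix-sum, write back.
--     # Mutates the dicts in place like the original; returns the same list.
--     vols = [d['rainVolume'] for d in d_list]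
--     increments = [max(0, b - a) for a, b in zip(vols, vols[1:])]
--     totals = [0]
--     total = 0
--     for inc in increments:
--         total += inc
--         totals.append(total)
--     for d, t in zip(d_list, totals):
--         d['rainVolume'] = t
--     return d_list
-- ===== Notes on version B (the rewrite author's own statement) =====
-- stated objective: alternative
-- what changed: Replaces A's single stateful delta-offset loop by three separate passes: extract the raw volumes, build the clamped consecutive differences and their prefix sums, then write each total back; B returns [] on an empty list where A raises IndexError, which Pre_ excludes.
-- outside the precondition, e.g. on fix_cumulative_rain([]): A raises IndexError, B returns []
import Mathlib
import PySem

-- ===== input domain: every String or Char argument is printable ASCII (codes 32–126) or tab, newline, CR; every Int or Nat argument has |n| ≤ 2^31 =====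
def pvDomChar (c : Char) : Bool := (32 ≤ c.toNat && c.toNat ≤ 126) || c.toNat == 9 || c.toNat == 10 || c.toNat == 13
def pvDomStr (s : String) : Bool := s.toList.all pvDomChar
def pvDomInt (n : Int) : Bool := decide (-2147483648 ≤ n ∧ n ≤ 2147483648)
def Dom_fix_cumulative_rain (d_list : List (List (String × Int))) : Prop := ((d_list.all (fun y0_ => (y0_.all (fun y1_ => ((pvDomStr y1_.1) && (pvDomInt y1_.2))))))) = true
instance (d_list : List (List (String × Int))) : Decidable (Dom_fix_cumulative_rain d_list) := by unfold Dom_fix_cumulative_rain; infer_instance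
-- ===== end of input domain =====

-- B rebuilds the totals in separate passes (extract volumes / clamp diffs / prefix-sum / write back)
-- instead of A's single delta-offset loop; same return value on nonempty inputs with a 'rainVolume' key.
-- Note: the Python functions mutate the dicts in place; the equivalence proved here is about the return value.


-- shared primitives for the Python dict subscript operations d['rainVolume'] (read / write)
def pvGetVol (d : List (String × Int)) : Int := (PySem.Dict.mk d).getD "rainVolume" 0
def pvSetVol (d : List (String × Int)) (v : Int) : List (String × Int) :=
  ((PySem.Dict.mk d).insert "rainVolume" v).items

-- ===== PORT A =====
-- A's for-loop: state (prev, delta), conditional bump of delta, then d['rainVolume'] += delta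
def pvLoopA (prev delta : Int) : List (List (String × Int)) → List (List (String × Int))
  | [] => []
  | d :: rest =>
    let v := pvGetVol d
    let delta' := if v < prev then delta + (prev - v) else delta
    pvSetVol d (v + delta') :: pvLoopA v delta' rest

def fix_cumulative_rain (d_list : List (List (String × Int))) : List (List (String × Int)) :=
  let prev := pvGetVol (d_list.headD [])   -- d_list[0]['rainVolume']; empty list excluded by Pre_
  pvLoopA prev (-prev) d_list

-- ===== PORT B =====
-- B's third pass: totals = [0]; for inc in increments: total += inc; totals.append(total)
def pvScanTotals (total : Int) : List Int → List Int
  | [] => []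
  | inc :: rest => (total + inc) :: pvScanTotals (total + inc) rest

-- B's final pass: for d, t in zip(d_list, totals): d['rainVolume'] = t
def pvWriteBack : List (List (String × Int)) → List Int → List (List (String × Int))
  | [], _ => []
  | _ :: _, [] => []
  | d :: ds, t :: ts => pvSetVol d t :: pvWriteBack ds ts

def fix_cumulative_rain_alt (d_list : List (List (String × Int))) : List (List (String × Int)) :=
  let vols := d_list.map pvGetVol
  let increments := (vols.zip vols.tail).map (fun p => max 0 (p.2 - p.1))
  let totals := 0 :: pvScanTotals 0 increments
  pvWriteBack d_list totals

-- ===== PRECONDITION & SPEC =====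
-- Pre_ excludes exactly the inputs where Python A raises: the empty list (IndexError on d_list[0])
-- and lists containing a dict without the 'rainVolume' key (KeyError).
def Pre_fix_cumulative_rain (d_list : List (List (String × Int))) : Prop :=
  d_list ≠ [] ∧ ∀ d ∈ d_list, (PySem.Dict.mk d).contains "rainVolume" = true
instance (d_list : List (List (String × Int))) : Decidable (Pre_fix_cumulative_rain d_list) := by
  unfold Pre_fix_cumulative_rain; infer_instance

def pvWitness_fix_cumulative_rain : (List (List (String × Int))) :=
  [[("rainVolume", 5)], [("rainVolume", 2)], [("rainVolume", 7)]]

def Spec_fix_cumulative_rain (d_list : List (List (String × Int))) (out : List (List (String × Int))) : Prop := out = fix_cumulative_rain_alt d_list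
instance (d_list : List (List (String × Int))) (out : List (List (String × Int))) : Decidable (Spec_fix_cumulative_rain d_list out) := by unfold Spec_fix_cumulative_rain; infer_instance

-- ===== CLAIM (what is proved, stated in full; the proofs are below) =====
def Claim_equal_fix_cumulative_rain : Prop := ∀ (d_list : List (List (String × Int))), Dom_fix_cumulative_rain d_list → Pre_fix_cumulative_rain d_list → Spec_fix_cumulative_rain d_list (fix_cumulative_rain d_list)

-- ===== LEMMAS AND PROOFS =====

-- bridge between A's stateful loop and B's passes: running volume + running total
def pvGoB (prevv total : Int) : List (List (String × Int)) → List (List (String × Int))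
  | [] => []
  | d :: rest =>
    let v := pvGetVol d
    let t := total + max 0 (v - prevv)
    pvSetVol d t :: pvGoB v t rest

theorem pvLoopA_eq_goB (ds : List (List (String × Int))) :
    ∀ prev delta : Int, pvLoopA prev delta ds = pvGoB prev (prev + delta) ds := by
  induction ds with
  | nil => intro prev delta; rfl
  | cons d rest ih =>
    intro prev delta
    simp only [pvLoopA, pvGoB]
    have hval : pvGetVol d + (if pvGetVol d < prev then delta + (prev - pvGetVol d) else delta)
        = prev + delta + max 0 (pvGetVol d - prev) := by
      split_ifs with h <;> omega
    rw [hval, ih, hval]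

def pvIncsOf (p : Int) : List Int → List Int
  | [] => []
  | v :: vs => max 0 (v - p) :: pvIncsOf v vs

theorem pvZip_map_eq_incs (vs : List Int) :
    ∀ p : Int, ((p :: vs).zip vs).map (fun q => max 0 (q.2 - q.1)) = pvIncsOf p vs := by
  induction vs with
  | nil => intro p; rfl
  | cons v vs' ih =>
    intro p
    simp only [List.zip_cons_cons, List.map_cons, pvIncsOf]
    rw [ih v]

theorem pvWriteBack_scan_eq_goB (ds : List (List (String × Int))) :
    ∀ p total : Int,
      pvWriteBack ds (pvScanTotals total (pvIncsOf p (ds.map pvGetVol))) = pvGoB p total ds := by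
  induction ds with
  | nil => intro p total; rfl
  | cons d rest ih =>
    intro p total
    simp only [List.map_cons, pvIncsOf, pvScanTotals, pvWriteBack, pvGoB]
    rw [ih]

-- ===== VERDICT (by name: the statement is the Claim_ definition above) =====
theorem fix_cumulative_rain_spec : Claim_equal_fix_cumulative_rain := by
  intro d_list _ hpre
  unfold Spec_fix_cumulative_rain
  obtain ⟨hne, _⟩ := hpre
  match d_list, hne with
  | d :: rest, _ =>
    unfold fix_cumulative_rain fix_cumulative_rain_alt
    simp only [List.headD_cons, List.map_cons, List.tail_cons]
    rw [pvZip_map_eq_incs (rest.map pvGetVol) (pvGetVol d)]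
    rw [pvLoopA_eq_goB]
    simp only [add_neg_cancel, pvGoB, pvWriteBack]
    have h1 : (0:Int) + max 0 (pvGetVol d - pvGetVol d) = 0 := by omega
    rw [h1, pvWriteBack_scan_eq_goB]
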